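-- pv_equiv track=rewrite | github.com/ivanebuenga/zigzag | test-py.py | how_many_cuts_v1
-- ===== SOURCE A (Python) =====
-- def how_many_cuts_v1(string):
--     if string and not string.isspace():
--         string_length = len(string)
--         arr = [0 for i in range(string_length)] #0(n)
--         for i in range(string_length): #0(n)
--             min_val = i #1
--             for j in range(i + 1): #0(n)
--                 #matching string[x] to string[x+1]
--                 if (string[i] == string[j]):
--                     min_val = min(min_val, 0 if  j == 0 else (arr[j - 1] + 1))
--             arr[i] = min_val;
--         return arr[string_length - 1]
-- ===== SOURCE B (Python) =====
-- def how_many_cuts_v1(string):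
--     if string and not string.isspace():
--         best = {}   # per character: minimum "term" seen so far (0 for position 0, arr[j-1]+1 for j>0)
--         prev = 0    # arr value of the previous position
--         for i, c in enumerate(string):
--             term = 0 if i == 0 else prev + 1
--             cur = min(best.get(c, term), term)
--             best[c] = cur
--             prev = cur
--         return prev
-- ===== Notes on version B (the rewrite author's own statement) =====
-- stated objective: faster
-- what changed: Replaces the quadratic inner rescan of all earlier positions with a single left-to-right pass that maintains, per character, a dict of the minimum recurrence term seen so far.
import Mathlib
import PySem

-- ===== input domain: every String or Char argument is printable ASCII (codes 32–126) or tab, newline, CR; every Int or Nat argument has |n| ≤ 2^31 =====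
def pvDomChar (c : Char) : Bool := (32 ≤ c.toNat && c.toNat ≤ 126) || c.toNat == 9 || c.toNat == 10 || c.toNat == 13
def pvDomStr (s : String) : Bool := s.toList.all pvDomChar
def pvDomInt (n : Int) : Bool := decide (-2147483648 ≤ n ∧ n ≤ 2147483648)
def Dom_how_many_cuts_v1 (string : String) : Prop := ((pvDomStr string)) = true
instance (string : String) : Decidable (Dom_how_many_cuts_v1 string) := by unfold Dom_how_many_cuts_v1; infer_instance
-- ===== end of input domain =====

-- B replaces A's quadratic rescan of earlier positions by one pass with a per-character
-- dict of minimum recurrence terms (objective: faster, asymptotic O(n^2) → O(n)).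

-- ===== PORT A =====
-- inner loop `for j in range(i+1): if string[i]==string[j]: min_val = min(min_val, 0 if j==0 else arr[j-1]+1)`
-- (all indices produced by `range` are in range here, so `[·]!` is exact for Python's s[i] / arr[j-1])
def aStep (s : List Char) (arr : List Int) (i : Nat) : Int :=
  (List.range (i + 1)).foldl
    (fun mv j => if s[i]! = s[j]! then min mv (if j = 0 then 0 else arr[j - 1]! + 1) else mv)
    (Int.ofNat i)

def how_many_cuts_v1 (string : String) : Option Int :=
  -- `if string and not string.isspace():`
  if string.toList ≠ [] ∧ PySem.Chars.strIsspace string.toList = false then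
    -- arr = [0 for i in range(n)]; for i in range(n): … ; arr[i] = min_val; return arr[n-1]
    some (((List.range string.toList.length).foldl
        (fun arr i => arr.set i (aStep string.toList arr i))
        ((List.range string.toList.length).map (fun _ => (0 : Int))))[string.toList.length - 1]!)
  else none

-- ===== PORT B =====
-- one enumerate step: term = 0 if i == 0 else prev + 1; cur = min(best.get(c, term), term); best[c] = cur; prev = cur
def bStep (st : PySem.Dict Char Int × Int) (ic : Int × Char) : PySem.Dict Char Int × Int :=
  let term : Int := if ic.1 = 0 then 0 else st.2 + 1
  let cur := min (st.1.getD ic.2 term) term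
  (st.1.insert ic.2 cur, cur)

def how_many_cuts_v1_alt (string : String) : Option Int :=
  if string.toList ≠ [] ∧ PySem.Chars.strIsspace string.toList = false then
    some ((PySem.List.enumerate string.toList).foldl bStep (PySem.Dict.empty, 0)).2
  else none

-- ===== PRECONDITION & SPEC =====
def Spec_how_many_cuts_v1 (string : String) (out : Option Int) : Prop := out = how_many_cuts_v1_alt string
instance (string : String) (out : Option Int) : Decidable (Spec_how_many_cuts_v1 string out) := by unfold Spec_how_many_cuts_v1; infer_instance

-- ===== CLAIM (what is proved, stated in full; the proofs are below) =====
def Claim_equal_how_many_cuts_v1 : Prop := ∀ (string : String), Dom_how_many_cuts_v1 string → Spec_how_many_cuts_v1 string (how_many_cuts_v1 string)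

-- ===== LEMMAS AND PROOFS =====

-- the list `arr` after the first k iterations of A's outer loop (prefix of final values)
def pvArr (s : List Char) : Nat → List Int
  | 0 => []
  | k + 1 => pvArr s k ++ [aStep s (pvArr s k) k]

-- the final value of arr[i]
def pvVal (s : List Char) (i : Nat) : Int := aStep s (pvArr s i) i

-- the "term" contributed by position j in the recurrence
def pvTerm (s : List Char) (j : Nat) : Int := if j = 0 then 0 else pvVal s (j - 1) + 1

def pvOptMin (o : Option Int) (x : Int) : Option Int :=
  some (o.elim x (fun v => min v x))

-- minimum term among positions j < k whose character equals c (none if there is no such j)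
def pvBest (s : List Char) (c : Char) (k : Nat) : Option Int :=
  (List.range k).foldl (fun o j => if c = s[j]! then pvOptMin o (pvTerm s j) else o) none

lemma pvArr_length (s : List Char) (k : Nat) : (pvArr s k).length = k := by
  induction k with
  | zero => rfl
  | succ k ih => simp [pvArr, ih]

lemma pvArr_getElem! (s : List Char) (k m : Nat) (h : m < k) :
    (pvArr s k)[m]! = pvVal s m := by
  induction k with
  | zero => omega
  | succ k ih =>
    have hlen := pvArr_length s k
    rcases Nat.lt_or_ge m k with hm | hm
    · rw [pvArr, List.getElem!_eq_getElem?_getD, List.getElem?_append_left (by omega),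
        ← List.getElem!_eq_getElem?_getD, ih hm]
    · have hmk : m = k := by omega
      subst hmk
      rw [pvArr, List.getElem!_eq_getElem?_getD, List.getElem?_append_right (by omega)]
      simp [hlen, pvVal]

-- the inner fold only reads arr[j-1] for j ≤ i, so a suffix of arr is irrelevant
lemma aStep_append (s : List Char) (arr b : List Int) (i : Nat) (h : i ≤ arr.length) :
    aStep s (arr ++ b) i = aStep s arr i := by
  unfold aStep
  refine PySem.List.foldl_congr_mem _ _ _ _ (fun mv j hj => ?_)
  have hj' : j < i + 1 := List.mem_range.mp hj
  by_cases h0 : j = 0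
  · simp [h0]
  · have hlt : j - 1 < arr.length := by omega
    have hget : (arr ++ b)[j - 1]! = arr[j - 1]! := by
      rw [List.getElem!_eq_getElem?_getD, List.getElem!_eq_getElem?_getD,
        List.getElem?_append_left hlt]
    rw [hget]

-- a general helper list fact: setting at the length of the left part
lemma pv_set_append_length (A : List Int) (x : Int) (rest : List Int) (v : Int) :
    ∀ k, k = A.length → (A ++ x :: rest).set k v = A ++ v :: rest := by
  induction A with
  | nil => intro k hk; subst hk; rfl
  | cons a A ih =>
    intro k hk
    subst hk
    simp only [List.cons_append, List.length_cons, List.set]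
    rw [ih _ rfl]

-- A's outer loop invariant
lemma A_inv (s : List Char) (n : Nat) (k : Nat) (hk : k ≤ n) :
    (List.range k).foldl (fun arr i => arr.set i (aStep s arr i)) (List.replicate n (0 : Int))
      = pvArr s k ++ List.replicate (n - k) 0 := by
  induction k with
  | zero => simp [pvArr]
  | succ k ih =>
    rw [List.range_succ, List.foldl_append, ih (by omega)]
    have hlen : (pvArr s k).length = k := pvArr_length s k
    have hrep : List.replicate (n - k) (0 : Int) = 0 :: List.replicate (n - (k + 1)) 0 := by
      rw [show n - k = (n - (k + 1)) + 1 by omega, List.replicate_succ]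
    have hstep : aStep s (pvArr s k ++ 0 :: List.replicate (n - (k + 1)) 0) k
        = aStep s (pvArr s k) k := aStep_append s _ _ k (by omega)
    simp only [List.foldl_cons, List.foldl_nil, hrep, hstep]
    rw [pv_set_append_length _ _ _ _ k hlen.symm]
    simp [pvArr]

-- turning a min-fold with an initial value into an optional-min fold
lemma foldl_min_elim (p : Nat → Prop) [DecidablePred p] (t : Nat → Int) (l : List Nat) :
    ∀ (init : Int) (o : Option Int),
      l.foldl (fun mv j => if p j then min mv (t j) else mv) (o.elim init (fun v => min init v))
        = (l.foldl (fun o j => if p j then pvOptMin o (t j) else o) o).elim init (fun v => min init v) := by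
  induction l with
  | nil => intro init o; rfl
  | cons j l ih =>
    intro init o
    by_cases hp : p j
    · simp only [List.foldl_cons, if_pos hp]
      have : min (o.elim init (fun v => min init v)) (t j)
          = (pvOptMin o (t j)).elim init (fun v => min init v) := by
        cases o with
        | none => simp [pvOptMin]
        | some v => simp [pvOptMin, min_assoc]
      rw [this, ih]
    · simp only [List.foldl_cons, if_neg hp]
      exact ih init o

-- a min-fold never exceeds its initial value
lemma foldl_min_le_init (p : Nat → Prop) [DecidablePred p] (t : Nat → Int) (l : List Nat) :
    ∀ init : Int, l.foldl (fun mv j => if p j then min mv (t j) else mv) init ≤ init := by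
  induction l with
  | nil => intro init; exact le_refl _
  | cons j l ih =>
    intro init
    by_cases hp : p j
    · simp only [List.foldl_cons, if_pos hp]
      exact le_trans (ih _) (min_le_left _ _)
    · simpa [hp] using ih init

lemma pvVal_le (s : List Char) (m : Nat) : pvVal s m ≤ (m : Int) :=
  foldl_min_le_init _ _ _ _

lemma pvTerm_le (s : List Char) (k : Nat) : pvTerm s k ≤ (k : Int) := by
  unfold pvTerm
  by_cases h0 : k = 0
  · simp [h0]
  · rw [if_neg h0]
    have := pvVal_le s (k - 1)
    have : ((k - 1 : Nat) : Int) = (k : Int) - 1 := by omega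
    have h := pvVal_le s (k - 1)
    omega

-- the key recurrence: A's arr[k] equals B's cur at step k
lemma pvVal_eq_min_best (s : List Char) (k : Nat) :
    pvVal s k = min ((pvBest s s[k]! k).getD (pvTerm s k)) (pvTerm s k) := by
  unfold pvVal aStep
  have hcongr : (List.range (k + 1)).foldl
      (fun mv j => if s[k]! = s[j]! then min mv (if j = 0 then (0 : Int) else (pvArr s k)[j - 1]! + 1) else mv)
      (Int.ofNat k)
      = (List.range (k + 1)).foldl
      (fun mv j => if s[k]! = s[j]! then min mv (pvTerm s j) else mv) (Int.ofNat k) := by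
    refine PySem.List.foldl_congr_mem _ _ _ _ (fun mv j hj => ?_)
    have hj' : j < k + 1 := List.mem_range.mp hj
    by_cases h0 : j = 0
    · simp [h0, pvTerm]
    · rw [pvArr_getElem! s k (j - 1) (by omega)]
      simp [pvTerm, h0]
  rw [hcongr]
  have helim := foldl_min_elim (fun j => s[k]! = s[j]!) (pvTerm s) (List.range (k + 1)) (Int.ofNat k) none
  simp only [Option.elim] at helim
  rw [helim]
  have hrange : (List.range (k + 1)).foldl
      (fun o j => if s[k]! = s[j]! then pvOptMin o (pvTerm s j) else o) none
      = pvOptMin (pvBest s s[k]! k) (pvTerm s k) := by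
    rw [List.range_succ, List.foldl_append]
    simp [pvBest]
  rw [hrange]
  have hterm : pvTerm s k ≤ (k : Int) := pvTerm_le s k
  cases hb : pvBest s s[k]! k with
  | none => simp [pvOptMin]; omega
  | some v =>
    simp only [pvOptMin, Option.elim, Option.getD]
    have : min v (pvTerm s k) ≤ (k : Int) := le_trans (min_le_right _ _) hterm
    simp only [Int.ofNat_eq_natCast]
    omega

-- pyGetD at an in-range natural index is getElem!
lemma pv_pyGetD_eq (s : List Char) (k : Nat) (d : Char) (h : k < s.length) :
    PySem.List.pyGetD s (k : Int) d = s[k]! := by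
  simp [PySem.List.pyGetD_natCast, List.getD_eq_getElem?_getD, List.getElem!_eq_getElem?_getD,
    List.getElem?_eq_getElem h]

-- B's loop invariant: after k steps, prev is arr[k-1] and the dict holds pvBest
lemma B_inv (s : List Char) (d : Char) (k : Nat) (hk : k ≤ s.length) :
    (((PySem.List.pyRange 0 (k : Int) 1).map (fun j => (j, PySem.List.pyGetD s j d))).foldl
        bStep (PySem.Dict.empty, 0)).2 = (if k = 0 then 0 else pvVal s (k - 1))
    ∧ ∀ (c : Char) (d0 : Int),
      (((PySem.List.pyRange 0 (k : Int) 1).map (fun j => (j, PySem.List.pyGetD s j d))).foldl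
        bStep (PySem.Dict.empty, 0)).1.getD c d0 = (pvBest s c k).getD d0 := by
  induction k with
  | zero =>
    constructor
    · simp
    · intro c d0; simp [pvBest, PySem.Dict.getD_empty]
  | succ k ih =>
    obtain ⟨ih2, ih1⟩ := ih (by omega)
    have hkl : k < s.length := by omega
    have hsplit : PySem.List.pyRange 0 ((k + 1 : Nat) : Int) 1
        = PySem.List.pyRange 0 (k : Int) 1 ++ [(k : Int)] := by
      rw [show ((k + 1 : Nat) : Int) = (k : Int) + 1 by omega]
      exact PySem.List.pyRange_one_succ_right (by omega)
    rw [hsplit, List.map_append, List.foldl_append]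
    set F := ((PySem.List.pyRange 0 (k : Int) 1).map (fun j => (j, PySem.List.pyGetD s j d))).foldl
        bStep (PySem.Dict.empty, 0) with hF
    simp only [List.map_cons, List.map_nil, List.foldl_cons, List.foldl_nil]
    rw [pv_pyGetD_eq s k d hkl]
    -- the step computes term = pvTerm s k and cur = pvVal s k
    have hterm : (if ((k : Int)) = 0 then 0 else F.2 + 1) = pvTerm s k := by
      by_cases h0 : k = 0
      · simp [h0, pvTerm]
      · rw [if_neg (by omega), ih2, if_neg h0]
        simp [pvTerm, h0]
    have hcur : min (F.1.getD s[k]! (pvTerm s k)) (pvTerm s k) = pvVal s k := by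
      rw [ih1, ← pvVal_eq_min_best]
    have hbestsucc : ∀ c : Char, pvBest s c (k + 1)
        = if c = s[k]! then pvOptMin (pvBest s c k) (pvTerm s k) else pvBest s c k := by
      intro c
      unfold pvBest
      rw [List.range_succ, List.foldl_append]
      simp
    constructor
    · simp only [bStep, hterm, hcur]
      simp [pvVal]
    · intro c d0
      simp only [bStep, hterm, hcur]
      rw [PySem.Dict.getD_insert, hbestsucc c]
      by_cases hc : c = s[k]!
      · rw [if_pos hc, if_pos hc, hc]
        rw [← hcur, ih1]
        cases hb : pvBest s s[k]! k with
        | none => simp [pvOptMin]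
        | some v => simp [pvOptMin]
      · rw [if_neg hc, if_neg hc, ih1]

-- ===== VERDICT (by name: the statement is the Claim_ definition above) =====
theorem how_many_cuts_v1_spec : Claim_equal_how_many_cuts_v1 := by
  intro string _
  unfold Spec_how_many_cuts_v1 how_many_cuts_v1 how_many_cuts_v1_alt
  by_cases h : string.toList ≠ [] ∧ PySem.Chars.strIsspace string.toList = false
  · rw [if_pos h, if_pos h]
    have hn : 1 ≤ string.toList.length := by
      rcases hsl : string.toList with _ | ⟨a, t⟩
      · exact absurd hsl h.1
      · simp
    rw [List.map_const', List.length_range,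
      A_inv string.toList string.toList.length string.toList.length (le_refl _)]
    simp only [Nat.sub_self, List.replicate_zero, List.append_nil]
    rw [pvArr_getElem! string.toList string.toList.length (string.toList.length - 1) (by omega)]
    rw [PySem.List.enumerate_eq_map_pyRange string.toList default, PySem.List.len_eq]
    obtain ⟨h2, _⟩ := B_inv string.toList default string.toList.length (le_refl _)
    rw [h2, if_neg (by omega)]
  · rw [if_neg h, if_neg h]
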